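-- pv_equiv track=rewrite | github.com/Hamza-Kachmir/SkillScope-Test | src/normalization.py | choose_best_representation
-- ===== SOURCE A (Python) =====
-- def choose_best_representation(skill_variants: list[str]) -> str:
--     if not skill_variants: return ""
--     def sort_key(skill):
--         has_space = ' ' in skill.strip()
--         uppercase_count = sum(1 for char in skill if char.isupper())
--         length = len(skill)
--         return (not has_space, -uppercase_count, -length, skill)
--     return sorted(skill_variants, key=sort_key)[0]
-- ===== SOURCE B (Python) =====
-- def choose_best_representation(skill_variants: list[str]) -> str:
--     if not skill_variants:
--         return ""
--     pool = [s for s in skill_variants if ' ' in s.strip()] or skill_variants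
--     best_upper = max(sum(1 for c in s if c.isupper()) for s in pool)
--     pool = [s for s in pool if sum(1 for c in s if c.isupper()) == best_upper]
--     best_len = max(len(s) for s in pool)
--     pool = [s for s in pool if len(s) == best_len]
--     return min(pool)
-- ===== Notes on version B (the rewrite author's own statement) =====
-- stated objective: alternative
-- what changed: Replaces the single sort by a composite 4-tuple key (then taking element 0) with staged refinement: keep space-containing variants if any, then those with maximal uppercase count, then maximal length, and return the plain-string min of the survivors.
import Mathlib
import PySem

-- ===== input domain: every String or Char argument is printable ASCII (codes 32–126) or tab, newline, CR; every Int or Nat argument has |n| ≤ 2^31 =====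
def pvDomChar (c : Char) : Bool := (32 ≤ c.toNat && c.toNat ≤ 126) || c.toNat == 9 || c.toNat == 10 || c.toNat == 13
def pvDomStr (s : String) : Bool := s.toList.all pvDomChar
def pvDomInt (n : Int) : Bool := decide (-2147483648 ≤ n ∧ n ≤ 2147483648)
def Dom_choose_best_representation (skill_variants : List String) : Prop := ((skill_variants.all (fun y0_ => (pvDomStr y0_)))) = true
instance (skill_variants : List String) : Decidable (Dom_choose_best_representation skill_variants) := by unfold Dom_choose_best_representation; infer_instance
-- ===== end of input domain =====

-- B replaces A's single composite-key sort with staged filter/max/min passes (no sort); objective: alternative decomposition.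

-- ===== PORT A =====
-- sort_key returns the tuple (not has_space, -uppercase_count, -length, skill); Python tuple order is lexicographic,
-- ported as PySem.List.sorted2 (PySem's tuple-key sort) with the two lexicographic pair keys below
def pvSortKeyA1 (skill : String) : Lex (Bool × Int) :=
  let has_space := PySem.Str.isIn " " (PySem.Str.strip skill)
  let uppercase_count : Int := skill.toList.countP (fun c => PySem.Chars.isupper c)
  toLex (!has_space, -uppercase_count)

def pvSortKeyA2 (skill : String) : Lex (Int × String) :=
  let length := PySem.Str.len skill
  toLex (-length, skill)

def choose_best_representation (skill_variants : List String) : String :=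
  if skill_variants = [] then ""
  else PySem.List.pyGetD (PySem.List.sorted2 skill_variants pvSortKeyA1 pvSortKeyA2) 0 ""

-- ===== PORT B =====
def pvHasSpaceB (s : String) : Bool := PySem.Str.isIn " " (PySem.Str.strip s)
def pvUpperB (s : String) : Int := s.toList.countP (fun c => PySem.Chars.isupper c)

def choose_best_representation_alt (skill_variants : List String) : String :=
  if skill_variants = [] then ""
  else
    let spaced := skill_variants.filter (fun s => pvHasSpaceB s)
    let pool1 := if spaced = [] then skill_variants else spaced
    let bestUpper := (PySem.List.max? (pool1.map pvUpperB) (fun x => x)).getD 0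
    let pool2 := pool1.filter (fun s => pvUpperB s == bestUpper)
    let bestLen := (PySem.List.max? (pool2.map PySem.Str.len) (fun x => x)).getD 0
    let pool3 := pool2.filter (fun s => PySem.Str.len s == bestLen)
    (PySem.List.min? pool3 (fun s => s)).getD ""

-- ===== PRECONDITION & SPEC =====
def Spec_choose_best_representation (skill_variants : List String) (out : String) : Prop := out = choose_best_representation_alt skill_variants
instance (skill_variants : List String) (out : String) : Decidable (Spec_choose_best_representation skill_variants out) := by unfold Spec_choose_best_representation; infer_instance

-- ===== CLAIM (what is proved, stated in full; the proofs are below) =====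
def Claim_equal_choose_best_representation : Prop := ∀ (skill_variants : List String), Dom_choose_best_representation skill_variants → Spec_choose_best_representation skill_variants (choose_best_representation skill_variants)

-- ===== LEMMAS AND PROOFS =====

-- proof-side combined key: the full 4-component lexicographic key as one nested Lex value
def pvKeyA (s : String) : Lex (Lex (Bool × Int) × Lex (Int × String)) :=
  toLex (pvSortKeyA1 s, pvSortKeyA2 s)

-- the string is recoverable from the key, so key-equal strings are equal
def pvKeyStr (k : Lex (Lex (Bool × Int) × Lex (Int × String))) : String :=
  (ofLex (ofLex k).2).2

theorem pvKeyStr_keyA (s : String) : pvKeyStr (pvKeyA s) = s := rfl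

-- A's sorted2 with the two pair keys IS sorted with the combined nested-Lex key
theorem pv_sorted2_eq_sorted (xs : List String) :
    PySem.List.sorted2 xs pvSortKeyA1 pvSortKeyA2 = PySem.List.sorted xs pvKeyA := by
  rw [PySem.List.sorted_eq_foldl_insertBy]
  show xs.foldl (fun acc x => PySem.List.insertBy
      (fun a b => decide (pvSortKeyA1 a < pvSortKeyA1 b) ||
        (!decide (pvSortKeyA1 b < pvSortKeyA1 a) && decide (pvSortKeyA2 a < pvSortKeyA2 b))) x acc) [] = _
  have hfun : (fun a b => decide (pvSortKeyA1 a < pvSortKeyA1 b) ||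
      (!decide (pvSortKeyA1 b < pvSortKeyA1 a) && decide (pvSortKeyA2 a < pvSortKeyA2 b)))
      = (fun a b => decide (pvKeyA a < pvKeyA b)) := by
    funext a b
    have hlt : pvKeyA a < pvKeyA b ↔
        (pvSortKeyA1 a < pvSortKeyA1 b ∨ (pvSortKeyA1 a = pvSortKeyA1 b ∧ pvSortKeyA2 a < pvSortKeyA2 b)) := by
      simp [pvKeyA, Prod.Lex.lt_iff]
    rcases lt_trichotomy (pvSortKeyA1 a) (pvSortKeyA1 b) with h | h | h
    · simp [h, hlt]
    · simp [h, hlt]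
    · simp [hlt, h, asymm h, ne_of_gt h]
  rw [hfun]

-- lexicographic introduction rule for the combined key
theorem pv_key_le (s t : String)
    (h : (!pvHasSpaceB s) < (!pvHasSpaceB t) ∨ ((!pvHasSpaceB s) = (!pvHasSpaceB t) ∧
      (pvUpperB t < pvUpperB s ∨ (pvUpperB s = pvUpperB t ∧
        (PySem.Str.len t < PySem.Str.len s ∨ (PySem.Str.len s = PySem.Str.len t ∧ s ≤ t)))))) :
    pvKeyA s ≤ pvKeyA t := by
  have h1 : pvSortKeyA1 s = toLex (!pvHasSpaceB s, -pvUpperB s) := rfl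
  have h2 : pvSortKeyA1 t = toLex (!pvHasSpaceB t, -pvUpperB t) := rfl
  have h3 : pvSortKeyA2 s = toLex (-PySem.Str.len s, s) := rfl
  have h4 : pvSortKeyA2 t = toLex (-PySem.Str.len t, t) := rfl
  rw [pvKeyA, pvKeyA, Prod.Lex.le_iff]
  simp only [ofLex_toLex, h1, h2, h3, h4]
  rcases h with h | ⟨hb, h⟩
  · exact Or.inl (Prod.Lex.lt_iff.mpr (Or.inl (by simpa using h)))
  · rcases h with h | ⟨hu, h⟩
    · exact Or.inl (Prod.Lex.lt_iff.mpr (Or.inr ⟨by simpa using hb, by simpa using h⟩))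
    · refine Or.inr ⟨by simp [hb, hu], ?_⟩
      rcases h with h | ⟨hl, hs⟩
      · exact Prod.Lex.le_iff.mpr (Or.inl (by simpa using h))
      · exact Prod.Lex.le_iff.mpr (Or.inr ⟨by simpa using hl, by simpa using hs⟩)

-- stage 1: the space-preferring pool
theorem pv_stage1 (xs : List String) (hne : xs ≠ []) :
    let spaced := xs.filter (fun s => pvHasSpaceB s)
    let pool1 := if spaced = [] then xs else spaced
    pool1 ≠ [] ∧ (∀ p ∈ pool1, p ∈ xs) ∧
      (∀ p ∈ pool1, ∀ y ∈ xs, ((!pvHasSpaceB p) ≤ (!pvHasSpaceB y) ∧ ((!pvHasSpaceB y) = (!pvHasSpaceB p) → y ∈ pool1))) := by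
  intro spaced pool1
  by_cases hsp : spaced = []
  · have hall : ∀ y ∈ xs, pvHasSpaceB y = false := by
      intro y hy
      have := List.filter_eq_nil_iff.mp hsp y hy
      simpa using this
    refine ⟨by simp [pool1, hsp, hne], by intro p hp; simpa [pool1, hsp] using hp, ?_⟩
    intro p hp y hy
    have hp' : p ∈ xs := by simpa [pool1, hsp] using hp
    simp [hall p hp', hall y hy, pool1, hsp, hy]
  · refine ⟨by simp [pool1, hsp], ?_, ?_⟩
    · intro p hp
      have hp' : p ∈ spaced := by simpa [pool1, hsp] using hp
      exact (List.mem_filter.mp hp').1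
    · intro p hp y hy
      have hp' : p ∈ spaced := by simpa [pool1, hsp] using hp
      have hps : pvHasSpaceB p = true := by simpa using (List.mem_filter.mp hp').2
      constructor
      · simp [hps]
      · intro heq
        have hys : pvHasSpaceB y = true := by
          cases hyv : pvHasSpaceB y <;> simp [hps, hyv] at heq ⊢
        have : y ∈ spaced := List.mem_filter.mpr ⟨hy, by simpa using hys⟩
        simpa [pool1, hsp] using this

-- stage 2/3: filtering down to the maximum of an Int-valued key
theorem pv_stageMax (k : String → Int) (l : List String) (hne : l ≠ []) :
    let M := (PySem.List.max? (l.map k) (fun x => x)).getD 0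
    let l' := l.filter (fun s => k s == M)
    l' ≠ [] ∧ (∀ p ∈ l', p ∈ l ∧ k p = M) ∧ (∀ y ∈ l, k y ≤ M ∧ (k y = M → y ∈ l')) := by
  intro M l'
  have hmap : l.map k ≠ [] := by simpa using hne
  obtain ⟨m, hm⟩ : ∃ m, PySem.List.max? (l.map k) (fun x => x) = some m := by
    cases h : PySem.List.max? (l.map k) (fun x => x) with
    | none => exact absurd ((PySem.List.max?_eq_none_iff _ _).mp h) hmap
    | some m => exact ⟨m, rfl⟩
  have hM : M = m := by simp [M, hm]
  have hmem : m ∈ l.map k := PySem.List.max?_mem hm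
  obtain ⟨w, hw, hwk⟩ := List.mem_map.mp hmem
  have hmax : ∀ y ∈ l, k y ≤ M := by
    intro y hy
    have := PySem.List.max?_isMax hm (k y) (List.mem_map.mpr ⟨y, hy, rfl⟩)
    simpa [hM] using this
  refine ⟨?_, ?_, ?_⟩
  · have : w ∈ l' := List.mem_filter.mpr ⟨hw, by simp [hwk, hM]⟩
    exact List.ne_nil_of_mem this
  · intro p hp
    obtain ⟨h1, h2⟩ := List.mem_filter.mp hp
    exact ⟨h1, by simpa using h2⟩
  · intro y hy
    exact ⟨hmax y hy, fun h => List.mem_filter.mpr ⟨hy, by simp [h]⟩⟩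

-- B returns a member of xs whose combined sort key is minimal
theorem pv_alt_min (xs : List String) (hne : xs ≠ []) :
    choose_best_representation_alt xs ∈ xs ∧
      ∀ y ∈ xs, pvKeyA (choose_best_representation_alt xs) ≤ pvKeyA y := by
  obtain ⟨h1ne, h1sub, h1ord⟩ := pv_stage1 xs hne
  set spaced := xs.filter (fun s => pvHasSpaceB s) with hspaced
  set pool1 := if spaced = [] then xs else spaced with hpool1
  obtain ⟨h2ne, h2sub, h2ord⟩ := pv_stageMax pvUpperB pool1 h1ne
  set U := (PySem.List.max? (pool1.map pvUpperB) (fun x => x)).getD 0 with hU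
  set pool2 := pool1.filter (fun s => pvUpperB s == U) with hpool2
  obtain ⟨h3ne, h3sub, h3ord⟩ := pv_stageMax PySem.Str.len pool2 h2ne
  set L := (PySem.List.max? (pool2.map PySem.Str.len) (fun x => x)).getD 0 with hL
  set pool3 := pool2.filter (fun s => PySem.Str.len s == L) with hpool3
  obtain ⟨b, hb⟩ : ∃ b, PySem.List.min? pool3 (fun s => s) = some b := by
    cases h : PySem.List.min? pool3 (fun s => s) with
    | none => exact absurd ((PySem.List.min?_eq_none_iff _ _).mp h) h3ne
    | some b => exact ⟨b, rfl⟩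
  have hbval : choose_best_representation_alt xs = b := by
    simp only [choose_best_representation_alt, if_neg hne]
    rw [← hspaced, ← hpool1, ← hU, ← hpool2, ← hL, ← hpool3, hb]
    rfl
  have hb3 : b ∈ pool3 := PySem.List.min?_mem hb
  have hb2 : b ∈ pool2 := (h3sub b hb3).1
  have hb1 : b ∈ pool1 := (h2sub b hb2).1
  have hbx : b ∈ xs := h1sub b hb1
  have hbU : pvUpperB b = U := (h2sub b hb2).2
  have hbL : PySem.Str.len b = L := (h3sub b hb3).2
  rw [hbval]
  refine ⟨hbx, ?_⟩
  intro y hy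
  obtain ⟨hsle, hseq⟩ := h1ord b hb1 y hy
  apply pv_key_le
  by_cases hbs : (!pvHasSpaceB b) = (!pvHasSpaceB y)
  · right
    refine ⟨hbs, ?_⟩
    have hy1 : y ∈ pool1 := hseq hbs.symm
    obtain ⟨hUle, hUeq⟩ := h2ord y hy1
    by_cases hbu : pvUpperB y = U
    · right
      refine ⟨by omega, ?_⟩
      have hy2 : y ∈ pool2 := hUeq hbu
      obtain ⟨hLle, hLeq⟩ := h3ord y hy2
      by_cases hbl : PySem.Str.len y = L
      · right
        refine ⟨by omega, ?_⟩
        have hy3 : y ∈ pool3 := hLeq hbl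
        exact PySem.List.min?_isMin hb y hy3
      · left; omega
    · left; omega
  · left
    exact lt_of_le_of_ne hsle hbs

-- ===== VERDICT (by name: the statement is the Claim_ definition above) =====
theorem choose_best_representation_spec : Claim_equal_choose_best_representation := by
  unfold Claim_equal_choose_best_representation
  intro xs _
  unfold Spec_choose_best_representation
  by_cases hne : xs = []
  · subst hne; rfl
  · obtain ⟨hbx, hbmin⟩ := pv_alt_min xs hne
    cases hs : PySem.List.sorted xs pvKeyA with
    | nil => exact absurd ((PySem.List.sorted_eq_nil_iff _ _ _).mp hs) hne
    | cons m t =>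
      have hA : choose_best_representation xs = m := by
        simp [choose_best_representation, hne, pv_sorted2_eq_sorted, hs, PySem.List.pyGetD_zero_cons]
      have hmx : m ∈ xs := by
        have : m ∈ PySem.List.sorted xs pvKeyA := by simp [hs]
        exact (PySem.List.mem_sorted xs pvKeyA false m).mp this
      have hmle : pvKeyA m ≤ pvKeyA (choose_best_representation_alt xs) :=
        PySem.List.key_head_sorted_le xs pvKeyA hs _ hbx
      have hble : pvKeyA (choose_best_representation_alt xs) ≤ pvKeyA m :=
        hbmin m hmx
      have hkeq : pvKeyA m = pvKeyA (choose_best_representation_alt xs) :=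
        le_antisymm hmle hble
      have := congrArg pvKeyStr hkeq
      rw [pvKeyStr_keyA, pvKeyStr_keyA] at this
      rw [hA, this]
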